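-- pv_equiv track=rewrite | github.com/tanglangai/LIC9012 | common_utils/preprocess_merge_something.py | merge_adjoint_postag
-- ===== SOURCE A (Python) =====
-- from typing import List, Dict
--
-- def merge_adjoint_postag(words: List[str], postags: List[str]) -> [List[str], List[str]]:
--     "将相邻的postags合并，比如t,t都代表时间且相邻，应该合并。"
--     ret_words = []
--     ret_postags = []
--     for word, tag in zip(words, postags):
--         if not ret_postags:
--             ret_words.append(word)
--             ret_postags.append(tag)
--         else:
--             # 暂时只融合t
--             if ret_postags[-1] == tag and tag in ['t']:
--                 ret_words[-1] = ret_words[-1] + word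
--             else:
--                 ret_words.append(word)
--                 ret_postags.append(tag)
--
--     assert len(ret_postags) == len(ret_words)
--     return ret_words, ret_postags
-- ===== SOURCE B (Python) =====
-- from typing import List
--
--
-- def merge_adjoint_postag(words: List[str], postags: List[str]) -> [List[str], List[str]]:
--     "Partition zip(words, postags) into maximal runs of equal tags, then reduce each run."
--     pairs = list(zip(words, postags))
--     n = len(pairs)
--     ret_words = []
--     ret_postags = []
--     i = 0
--     while i < n:
--         tag = pairs[i][1]
--         j = i + 1
--         while j < n and pairs[j][1] == tag:
--             j += 1
--         run = pairs[i:j]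
--         if tag == 't':
--             merged = ''
--             for w, _ in run:
--                 merged += w
--             ret_words.append(merged)
--             ret_postags.append('t')
--         else:
--             for w, t in run:
--                 ret_words.append(w)
--                 ret_postags.append(t)
--         i = j
--     return ret_words, ret_postags
-- ===== Notes on version B (the rewrite author's own statement) =====
-- stated objective: alternative
-- what changed: B partitions zip(words, postags) into maximal runs of equal tags with an inner scan and reduces each run at once (concatenate the words for a 't' run, emit elements individually otherwise), instead of A's element-by-element loop that mutates the last element of its accumulator.
import Mathlib
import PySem

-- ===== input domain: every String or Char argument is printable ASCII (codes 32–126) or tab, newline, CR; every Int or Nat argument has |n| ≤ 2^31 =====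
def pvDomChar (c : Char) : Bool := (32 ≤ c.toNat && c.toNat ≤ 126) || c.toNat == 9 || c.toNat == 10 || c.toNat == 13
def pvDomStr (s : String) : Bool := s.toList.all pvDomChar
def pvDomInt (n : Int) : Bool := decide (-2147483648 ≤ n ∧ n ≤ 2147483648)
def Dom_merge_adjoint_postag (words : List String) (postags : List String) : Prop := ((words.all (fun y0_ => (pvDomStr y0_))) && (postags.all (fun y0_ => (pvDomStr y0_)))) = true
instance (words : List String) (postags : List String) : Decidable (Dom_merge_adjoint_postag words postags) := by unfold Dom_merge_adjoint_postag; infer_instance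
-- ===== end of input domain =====

-- B partitions the zipped input into maximal runs of equal tags and reduces each run at
-- once, instead of A's element-by-element loop mutating the last accumulator slot
-- (alternative decomposition; same asymptotic cost).

-- ===== PORT A =====
-- one iteration of A's for-loop body, state = (ret_words, ret_postags)
def pvAStep (acc : List String × List String) (wt : String × String) : List String × List String :=
  if acc.2 = [] then (acc.1 ++ [wt.1], acc.2 ++ [wt.2])
  else if acc.2.getLast! = wt.2 ∧ wt.2 ∈ ["t"] then
    (acc.1.dropLast ++ [acc.1.getLast! ++ wt.1], acc.2)
  else (acc.1 ++ [wt.1], acc.2 ++ [wt.2])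

def merge_adjoint_postag (words : List String) (postags : List String) : List String × List String :=
  (words.zip postags).foldl pvAStep ([], [])

-- ===== PORT B =====
-- Source B's "merged = ''; for w, _ in run: merged += w"
def pvConcatRun (run : List (String × String)) : String :=
  run.foldl (fun acc p => acc ++ p.1) ""

-- Source B's outer while loop: peel one maximal run of equal tags per step
def pvBGo : List (String × String) → List String × List String
  | [] => ([], [])
  | (w, t) :: rest =>
    let run := rest.takeWhile (fun p => p.2 == t)
    let rest' := rest.dropWhile (fun p => p.2 == t)
    let r := pvBGo rest'
    if t = "t" then
      (pvConcatRun ((w, t) :: run) :: r.1, "t" :: r.2)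
    else
      (w :: run.map Prod.fst ++ r.1, t :: run.map Prod.snd ++ r.2)
  termination_by l => l.length
  decreasing_by
    exact Nat.lt_succ_of_le (List.length_dropWhile_le _ _)

def merge_adjoint_postag_alt (words : List String) (postags : List String) : List String × List String :=
  pvBGo (words.zip postags)

-- ===== PRECONDITION & SPEC =====
def Spec_merge_adjoint_postag (words : List String) (postags : List String) (out : List String × List String) : Prop := out = merge_adjoint_postag_alt words postags
instance (words : List String) (postags : List String) (out : List String × List String) : Decidable (Spec_merge_adjoint_postag words postags out) := by unfold Spec_merge_adjoint_postag; infer_instance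

-- ===== CLAIM (what is proved, stated in full; the proofs are below) =====
def Claim_equal_merge_adjoint_postag : Prop := ∀ (words : List String) (postags : List String), Dom_merge_adjoint_postag words postags → Spec_merge_adjoint_postag words postags (merge_adjoint_postag words postags)

-- ===== LEMMAS AND PROOFS =====

-- proof-side description of A's loop once the accumulator is nonempty:
-- (cw, ct) is the last (mutable) slot, already-fixed prefix omitted
def pvCarry (cw ct : String) : List (String × String) → List String × List String
  | [] => ([cw], [ct])
  | (w, t) :: rest =>
    if ct = t ∧ t ∈ ["t"] then pvCarry (cw ++ w) ct rest
    else (cw :: (pvCarry w t rest).1, ct :: (pvCarry w t rest).2)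

theorem pvFoldA (pairs : List (String × String)) :
    ∀ (rw rp : List String) (cw ct : String),
      pairs.foldl pvAStep (rw ++ [cw], rp ++ [ct])
        = (rw ++ (pvCarry cw ct pairs).1, rp ++ (pvCarry cw ct pairs).2) := by
  induction pairs with
  | nil => intro rw rp cw ct; simp [pvCarry]
  | cons hd tl ih =>
    intro rw rp cw ct
    obtain ⟨w, t⟩ := hd
    by_cases h : ct = t ∧ t ∈ ["t"]
    · have hstep : pvAStep (rw ++ [cw], rp ++ [ct]) (w, t)
          = (rw ++ [cw ++ w], rp ++ [ct]) := by
        simp [pvAStep, h]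
      simp only [List.foldl_cons, hstep, ih, pvCarry, if_pos h]
    · have hstep : pvAStep (rw ++ [cw], rp ++ [ct]) (w, t)
          = ((rw ++ [cw]) ++ [w], (rp ++ [ct]) ++ [t]) := by
        simp only [pvAStep]
        simp
        intro h1 h2
        exact h ⟨h1, by simp [h2]⟩
      rw [List.foldl_cons, hstep, ih]
      simp only [pvCarry, if_neg h]
      simp

theorem pvCarry_bGo (n : ℕ) :
    ∀ (rest : List (String × String)) (w t : String), rest.length ≤ n →
      pvCarry w t rest = pvBGo ((w, t) :: rest) := by
  induction n with
  | zero =>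
    intro rest w t hlen
    have : rest = [] := List.eq_nil_of_length_eq_zero (Nat.le_zero.mp hlen)
    subst this
    by_cases ht : t = "t" <;> simp [pvCarry, pvBGo, pvConcatRun, ht]
  | succ n ih =>
    intro rest w t hlen
    match rest with
    | [] =>
      by_cases ht : t = "t" <;> simp [pvCarry, pvBGo, pvConcatRun, ht]
    | (w2, t2) :: rest2 =>
      have hlen2 : rest2.length ≤ n := by
        simpa using Nat.lt_succ_iff.mp (Nat.lt_of_lt_of_le (by simp) hlen)
      by_cases hc : t = t2 ∧ t2 ∈ ["t"]
      · obtain ⟨hteq, ht2⟩ := hc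
        have ht2' : t2 = "t" := by simpa using ht2
        subst hteq; subst ht2'
        have h1 : pvCarry w "t" ((w2, "t") :: rest2) = pvCarry (w ++ w2) "t" rest2 := by
          simp [pvCarry]
        rw [h1, ih rest2 (w ++ w2) "t" hlen2]
        simp only [pvBGo, List.takeWhile, List.dropWhile, beq_self_eq_true]
        simp [pvConcatRun, List.foldl_cons]
      · have h1 : pvCarry w t ((w2, t2) :: rest2)
            = (w :: (pvCarry w2 t2 rest2).1, t :: (pvCarry w2 t2 rest2).2) := by
          simp only [pvCarry, if_neg hc]
        rw [h1, ih rest2 w2 t2 hlen2]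
        by_cases ht2 : t2 = t
        · subst ht2
          have htne : t2 ≠ "t" := by
            intro h; exact hc ⟨rfl, by simp [h]⟩
          simp [pvBGo, htne, List.takeWhile, List.dropWhile]
        · have hb : (t2 == t) = false := by simp [ht2]
          by_cases ht : t = "t"
          · subst ht
            simp [pvBGo, hb, List.takeWhile, List.dropWhile, pvConcatRun]
          · simp [pvBGo, hb, ht, List.takeWhile, List.dropWhile]

-- ===== VERDICT (by name: the statement is the Claim_ definition above) =====
theorem merge_adjoint_postag_spec : Claim_equal_merge_adjoint_postag := by
  intro words postags _
  unfold Spec_merge_adjoint_postag merge_adjoint_postag merge_adjoint_postag_alt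
  cases hz : words.zip postags with
  | nil => simp [pvBGo]
  | cons hd rest =>
    obtain ⟨w, t⟩ := hd
    have hfirst : pvAStep ([], []) (w, t) = ([] ++ [w], [] ++ [t]) := by
      simp [pvAStep]
    rw [List.foldl_cons, hfirst, pvFoldA]
    rw [pvCarry_bGo rest.length rest w t (le_refl _)]
    simp
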